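-- pv_equiv track=rewrite | github.com/rawatpranjal/santafe | engine/token_generator.py | _determine_weights
-- ===== SOURCE A (Python) =====
-- def _determine_weights(i: int) -> list[int]:
--     w = [0] * 5
--     temp_i = i
--     for x in range(1, 5):
--         digit = temp_i // (10 ** (4 - x))
--         temp_i -= digit * (10 ** (4 - x))
--         w[x] = int(3**digit - 1)
--     return w
-- ===== SOURCE B (Python) =====
-- def _determine_weights(i: int) -> list[int]:
--     # Peel digits right-to-left with divmod, building the list back-to-front
--     # recursively; the final quotient becomes the (overflow-absorbing) top slot.
--     def go(q, k, acc):
--         if k == 0: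
--             return [0, 3 ** q - 1] + acc
--         q, d = divmod(q, 10)
--         return go(q, k - 1, [3 ** d - 1] + acc)
--     return go(i, 3, [])
-- ===== Notes on version B (the rewrite author's own statement) =====
-- stated objective: alternative
-- what changed: Replaces A's left-to-right stateful loop (running remainder temp_i, in-place list writes) by a recursion that peels digits right-to-left with divmod and builds the list back-to-front, the final quotient becoming the overflow-absorbing top slot.
-- outside the precondition, e.g. on _determine_weights(-1000): A returns [0, 0, 0, 0, 0], B returns [0, -0.6666666666666667, 0, 0, 0]
import Mathlib
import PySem

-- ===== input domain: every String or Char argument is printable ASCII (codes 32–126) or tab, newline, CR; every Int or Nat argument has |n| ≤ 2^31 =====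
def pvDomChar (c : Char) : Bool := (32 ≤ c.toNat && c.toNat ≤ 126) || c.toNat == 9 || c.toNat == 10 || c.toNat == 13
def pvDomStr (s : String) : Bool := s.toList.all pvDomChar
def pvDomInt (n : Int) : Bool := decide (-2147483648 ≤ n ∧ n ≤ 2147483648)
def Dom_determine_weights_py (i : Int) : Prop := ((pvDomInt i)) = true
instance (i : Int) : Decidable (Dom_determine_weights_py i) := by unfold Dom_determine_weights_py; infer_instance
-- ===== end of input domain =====

-- B peels digits right-to-left with divmod, building the list back-to-front recursively
-- (the final quotient becomes the top slot), instead of A's left-to-right stateful loop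
-- with a running remainder and in-place writes; objective: alternative.


-- ===== PORT A =====
-- Python's int(3**digit - 1): exact integer power for digit >= 0; for digit < 0 CPython
-- evaluates 3**digit as a float, and int() of that float minus 1 is 0 for -34 <= digit <= -1
-- and -1 for digit <= -35 (rounding to -1.0, then underflow; checked against CPython for
-- every digit reachable from |i| <= 2^31).
def pyInt3PowSub1 (d : Int) : Int :=
  if 0 ≤ d then (3 : Int) ^ d.toNat - 1 else if -34 ≤ d then 0 else -1

def determine_weights_py (i : Int) : List Int :=
  (PySem.List.pyRange 1 5 1).foldl
    (fun (st : List Int × Int) (x : Int) =>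
      let digit := PySem.Int.floordiv st.2 ((10 : Int) ^ (4 - x).toNat)
      let temp_i := st.2 - digit * (10 : Int) ^ (4 - x).toNat
      (st.1.set x.toNat (pyInt3PowSub1 digit), temp_i))
    ([0, 0, 0, 0, 0], i)
  |>.1

-- ===== PORT B =====
-- Port of B's recursive helper go(q, k, acc); 3**d - 1 with d ≥ 0 (guaranteed on Pre_)
-- is the exact integer 3 ^ d.toNat - 1.
def altGo (q : Int) (k : Nat) (acc : List Int) : List Int :=
  match k with
  | 0 => [0, (3 : Int) ^ q.toNat - 1] ++ acc
  | Nat.succ k' =>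
      altGo (PySem.Int.floordiv q 10) k'
        (((3 : Int) ^ (PySem.Int.mod q 10).toNat - 1) :: acc)

def determine_weights_py_alt (i : Int) : List Int := altGo i 3 []

-- ===== PRECONDITION & SPEC =====
-- Pre_ excludes negative i, on which A's first entry is the int() truncation of the float
-- power 3**(negative digit) (0, or -1 once that float rounds to -1.0) while B returns a
-- non-integer float there, i.e. not a value of the declared list[int] type.
def Pre_determine_weights_py (i : Int) : Prop := 0 ≤ i
instance (i : Int) : Decidable (Pre_determine_weights_py i) := by unfold Pre_determine_weights_py; infer_instance
def pvWitness_determine_weights_py : Int := (1234)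
def Spec_determine_weights_py (i : Int) (out : List Int) : Prop := out = determine_weights_py_alt i
instance (i : Int) (out : List Int) : Decidable (Spec_determine_weights_py i out) := by unfold Spec_determine_weights_py; infer_instance

-- ===== CLAIM (what is proved, stated in full; the proofs are below) =====
def Claim_equal_determine_weights_py : Prop := ∀ (i : Int), Dom_determine_weights_py i → Pre_determine_weights_py i → Spec_determine_weights_py i (determine_weights_py i)

-- ===== LEMMAS AND PROOFS =====
-- int(3**d - 1) with d ≥ 0 is the exact integer 3^d - 1
theorem pos1 (d : Int) (h : 0 ≤ d) : pyInt3PowSub1 d = (3 : Int) ^ d.toNat - 1 := by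
  simp [pyInt3PowSub1, h]

-- ===== VERDICT (by name: the statement is the Claim_ definition above) =====
theorem determine_weights_py_spec : Claim_equal_determine_weights_py := by
  intro i _ hpre
  unfold Spec_determine_weights_py determine_weights_py determine_weights_py_alt
  have hpre' : (0 : Int) ≤ i := hpre
  have hr : PySem.List.pyRange 1 5 1 = [1, 2, 3, 4] := by decide
  rw [hr]
  simp only [List.foldl, altGo, List.cons_append, List.nil_append]
  norm_num [List.set]
  simp only [show Int.toNat 2 = 2 from rfl, show Int.toNat 3 = 3 from rfl,
    show Int.toNat 4 = 4 from rfl, show (10:Int) ^ 3 = 1000 from by norm_num,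
    show (10:Int) ^ 2 = 100 from by norm_num]
  simp only [List.set]
  rw [pos1 _ (by omega), pos1 _ (by omega), pos1 _ (by omega), pos1 _ (by omega)]
  simp only [List.cons.injEq]
  refine ⟨trivial, ?_, ?_, ?_, ?_, trivial⟩ <;> (congr 2; omega)
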